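-- pv_equiv track=rewrite | github.com/voidbert/HangmanAI | main.py | most_likely_letter
-- ===== SOURCE A (Python) =====
-- def most_likely_letter(words, letters_to_exclude):
-- 	#Create a dictionary to store the number of occurrences of every character.
-- 	characters = {}
-- 	#Register the number of occurrences of every character in all the words. Don't register already
-- 	#suggested letters.
-- 	for word in words:
-- 		for character in word:
-- 			if character not in letters_to_exclude:
-- 				#If there isn't an entry for this character, create it
-- 				if character in characters.keys():
-- 					characters[character] += 1
-- 				else:
-- 					characters[character] = 1
-- 	#Return the character with the most occurrences
-- 	return max(characters, key=characters.get)
-- ===== SOURCE B (Python) =====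
-- def most_likely_letter(words, letters_to_exclude):
-- 	#Distinct candidate characters, in order of first appearance across all words.
-- 	candidates = []
-- 	for word in words:
-- 		for character in word:
-- 			if character not in letters_to_exclude and character not in candidates:
-- 				candidates.append(character)
-- 	#Return the candidate with the most total occurrences, counted by rescanning the
-- 	#words per candidate; max keeps the first maximum (first-appearance tie-break)
-- 	#and still raises ValueError when there are no candidates.
-- 	return max(candidates, key=lambda c: sum(word.count(c) for word in words))
-- ===== Notes on version B (the rewrite author's own statement) =====
-- stated objective: alternative
-- what changed: Replaces A's single-pass occurrence dictionary with a two-phase selection: build the list of distinct non-excluded characters in first-appearance order, then pick the argmax by recounting each candidate's occurrences with str.count over all words (first maximum wins, as in A's max over dict keys).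
import Mathlib
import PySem

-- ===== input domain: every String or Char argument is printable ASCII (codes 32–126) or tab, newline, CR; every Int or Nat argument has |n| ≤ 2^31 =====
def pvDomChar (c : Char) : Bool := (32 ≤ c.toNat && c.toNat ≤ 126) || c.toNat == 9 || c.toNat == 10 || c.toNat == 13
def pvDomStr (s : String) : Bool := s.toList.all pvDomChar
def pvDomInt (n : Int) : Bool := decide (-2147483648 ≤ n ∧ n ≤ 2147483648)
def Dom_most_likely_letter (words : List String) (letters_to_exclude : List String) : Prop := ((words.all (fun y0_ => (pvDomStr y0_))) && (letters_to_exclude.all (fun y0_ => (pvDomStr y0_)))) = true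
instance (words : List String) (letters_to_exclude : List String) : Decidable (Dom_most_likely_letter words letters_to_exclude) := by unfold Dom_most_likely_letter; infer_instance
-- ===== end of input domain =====

-- B replaces A's single-pass occurrence dictionary by a first-appearance candidate list
-- plus an argmax that recounts each candidate over the words (alternative decomposition, not faster).


-- ===== PORT A =====
-- dict of per-character counts; max(characters, key=characters.get) iterates the keys in
-- insertion order and keeps the first maximum; every key is present, so .get = .getD _ 0.
def most_likely_letter (words : List String) (letters_to_exclude : List String) : String :=
  let characters : PySem.Dict Char Int := words.foldl (fun d word =>
    word.toList.foldl (fun d character =>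
      if ¬ (letters_to_exclude.contains (String.mk [character])) then
        if d.contains character then d.insert character (d.getD character 0 + 1)
        else d.insert character 1
      else d) d) PySem.Dict.empty
  match PySem.List.max? characters.keys (fun c => characters.getD c 0) with
  | some c => String.mk [c]
  | none => ""   -- Python raises ValueError here; excluded by Pre_

-- ===== PORT B =====
def most_likely_letter_alt (words : List String) (letters_to_exclude : List String) : String :=
  let candidates : List Char := words.foldl (fun acc word =>
    word.toList.foldl (fun acc character =>
      if ¬ (letters_to_exclude.contains (String.mk [character])) ∧ ¬ (acc.contains character)
      then acc ++ [character] else acc) acc) []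
  match PySem.List.max? candidates
      (fun c => ((words.map (fun w => ((PySem.Str.count w (String.mk [c]) : Int)))).sum)) with
  | some c => String.mk [c]
  | none => ""   -- Python raises ValueError here; excluded by Pre_

-- ===== PRECONDITION & SPEC =====
-- Pre_ excludes exactly the inputs with no countable character (every character of every
-- word excluded, or no characters at all), where Python's max raises ValueError.
def Pre_most_likely_letter (words : List String) (letters_to_exclude : List String) : Prop :=
  (words.flatMap String.toList).any
    (fun c => !(letters_to_exclude.contains (String.mk [c]))) = true
instance (words : List String) (letters_to_exclude : List String) : Decidable (Pre_most_likely_letter words letters_to_exclude) := by unfold Pre_most_likely_letter; infer_instance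
def pvWitness_most_likely_letter : List String × List String := (["hangman", "game"], ["a"])
def Spec_most_likely_letter (words : List String) (letters_to_exclude : List String) (out : String) : Prop := out = most_likely_letter_alt words letters_to_exclude
instance (words : List String) (letters_to_exclude : List String) (out : String) : Decidable (Spec_most_likely_letter words letters_to_exclude out) := by unfold Spec_most_likely_letter; infer_instance

-- ===== CLAIM (what is proved, stated in full; the proofs are below) =====
def Claim_equal_most_likely_letter : Prop := ∀ (words : List String) (letters_to_exclude : List String), Dom_most_likely_letter words letters_to_exclude → Pre_most_likely_letter words letters_to_exclude → Spec_most_likely_letter words letters_to_exclude (most_likely_letter words letters_to_exclude)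

-- ===== LEMMAS AND PROOFS =====

-- a nested for-word/for-char fold is a fold over the flattened character list
theorem pv_foldl_inner_flat {σ : Type} (f : σ → Char → σ) : ∀ (ws : List String) (init : σ),
    ws.foldl (fun d w => w.toList.foldl f d) init = (ws.flatMap String.toList).foldl f init
  | [], _ => rfl
  | w :: ws, init => by
      simp only [List.flatMap_cons, List.foldl_append, List.foldl_cons]
      exact pv_foldl_inner_flat f ws _

-- a fold that skips elements failing p is a fold over the filtered list
theorem pv_foldl_if_filter {σ α : Type} (p : α → Bool) (g : σ → α → σ) :
    ∀ (l : List α) (d : σ),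
    l.foldl (fun d c => if p c then g d c else d) d = (l.filter p).foldl g d
  | [], _ => rfl
  | c :: l, d => by
      by_cases h : p c = true <;>
        simp [h, pv_foldl_if_filter p g l]

theorem pv_getD_zero_of_not_contains {κ : Type} [BEq κ] (d : PySem.Dict κ Int) (k : κ)
    (h : d.contains k = false) : d.getD k 0 = 0 := by
  simp only [PySem.Dict.contains, List.any_eq_false] at h
  simp [PySem.Dict.getD, PySem.Dict.get?, List.find?_eq_none.mpr fun p hp => by
    simpa using h p hp]

-- max? only looks at the key of members, so equal keys on members give equal results
theorem pv_maxfold_congr {α : Type} (k1 k2 : α → Int) :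
    ∀ (xs : List α) (acc : Option α),
    (∀ x ∈ xs, k1 x = k2 x) → (∀ m, acc = some m → k1 m = k2 m) →
    List.foldl (fun acc x => match acc with
      | none => some x
      | some m => if k1 m < k1 x then some x else some m) acc xs =
    List.foldl (fun acc x => match acc with
      | none => some x
      | some m => if k2 m < k2 x then some x else some m) acc xs
  | [], _, _, _ => rfl
  | x :: t, none, h, _ => by
      simp only [List.foldl_cons]
      exact pv_maxfold_congr k1 k2 t (some x)
        (fun y hy => h y (List.mem_cons_of_mem _ hy))
        (fun m hm => by cases hm; exact h x (by simp))
  | x :: t, some m, h, hacc => by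
      have hm : k1 m = k2 m := hacc m rfl
      have hx : k1 x = k2 x := h x (by simp)
      have ht : ∀ y ∈ t, k1 y = k2 y := fun y hy => h y (List.mem_cons_of_mem _ hy)
      have step1 : (fun (acc : Option α) (x : α) => match acc with
          | none => some x
          | some m => if k1 m < k1 x then some x else some m) (some m) x
          = if k1 m < k1 x then some x else some m := rfl
      have step2 : (fun (acc : Option α) (x : α) => match acc with
          | none => some x
          | some m => if k2 m < k2 x then some x else some m) (some m) x
          = if k2 m < k2 x then some x else some m := rfl
      by_cases hc : k1 m < k1 x
      · have hc2 : k2 m < k2 x := by rw [← hm, ← hx]; exact hc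
        simp only [List.foldl_cons, step1, step2, if_pos hc, if_pos hc2]
        exact pv_maxfold_congr k1 k2 t (some x) ht
          (fun m' hm' => by cases hm'; exact hx)
      · have hc2 : ¬ k2 m < k2 x := by rw [← hm, ← hx]; exact hc
        simp only [List.foldl_cons, step1, step2, if_neg hc, if_neg hc2]
        exact pv_maxfold_congr k1 k2 t (some m) ht
          (fun m' hm' => by cases hm'; exact hm)

theorem pv_max?_congr_key {α : Type} (xs : List α) (k1 k2 : α → Int)
    (h : ∀ x ∈ xs, k1 x = k2 x) : PySem.List.max? xs k1 = PySem.List.max? xs k2 :=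
  pv_maxfold_congr k1 k2 xs none h (fun m hm => by cases hm)

-- str.count with a one-character needle is List.count on the characters
theorem pv_count_go_singleton (c : Char) : ∀ (fuel : Nat) (s : List Char) (acc : Nat),
    s.length ≤ fuel → PySem.Chars.count.go [c] fuel s acc = acc + s.count c
  | 0, [], acc, _ => by simp [PySem.Chars.count.go]
  | 0, x :: t, acc, h => absurd h (by simp)
  | fuel + 1, [], acc, _ => by simp [PySem.Chars.count.go]
  | fuel + 1, x :: t, acc, h => by
      have ht : t.length ≤ fuel := by simpa using h
      by_cases hx : c = x
      · subst hx
        simp [PySem.Chars.count.go, List.isPrefixOf, pv_count_go_singleton c fuel t _ ht,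
          List.count_cons]
        omega
      · have : (c == x) = false := by simp [hx]
        simp [PySem.Chars.count.go, List.isPrefixOf, this,
          pv_count_go_singleton c fuel t _ ht, List.count_cons, Ne.symm hx]

theorem pv_str_count_singleton (w : String) (c : Char) :
    PySem.Str.count w (String.mk [c]) = w.toList.count c := by
  have h : PySem.Chars.count w.toList [c] = w.toList.count c := by
    unfold PySem.Chars.count
    simpa using pv_count_go_singleton c w.toList.length w.toList 0 le_rfl
  have e : (String.mk [c]).toList = [c] := Eq.symm (String.ofList_eq.mp rfl)
  rw [PySem.Str.count_eq, e, h]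

theorem pv_count_flatMap (c : Char) : ∀ (ws : List String),
    ((ws.flatMap String.toList).count c : Int) =
      (ws.map (fun w => ((PySem.Str.count w (String.mk [c]) : Int)))).sum
  | [] => by simp
  | w :: ws => by
      rw [List.flatMap_cons, List.count_append, List.map_cons, List.sum_cons,
        pv_str_count_singleton, ← pv_count_flatMap c ws]
      push_cast
      ring

-- ===== VERDICT (by name: the statement is the Claim_ definition above) =====
theorem most_likely_letter_spec : Claim_equal_most_likely_letter := by
  intro words lte _ _
  unfold Spec_most_likely_letter most_likely_letter most_likely_letter_alt
  set p : Char → Bool := fun c => !(lte.contains (String.mk [c])) with hp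
  set cs : List Char := words.flatMap String.toList with hcs
  -- A's dictionary is the counter of the filtered character stream
  have hA : (words.foldl (fun d word =>
      word.toList.foldl (fun d character =>
        if ¬ (lte.contains (String.mk [character])) then
          if d.contains character then d.insert character (d.getD character 0 + 1)
          else d.insert character 1
        else d) d) PySem.Dict.empty) = PySem.Dict.counter (cs.filter p) := by
    rw [pv_foldl_inner_flat, ← hcs]
    have hstep : (fun (d : PySem.Dict Char Int) (c : Char) =>
        if ¬ (lte.contains (String.mk [c])) then
          if d.contains c then d.insert c (d.getD c 0 + 1) else d.insert c 1
        else d) =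
        (fun d c => if p c then d.insert c (d.getD c 0 + 1) else d) := by
      funext d c
      by_cases hc : String.mk [c] ∈ lte
      · simp [hp, hc]
      · by_cases hd : d.contains c = true
        · simp [hp, hc, hd]
        · have hd' : d.contains c = false := by simpa using hd
          simp [hp, hc, hd', pv_getD_zero_of_not_contains d c hd']
    rw [hstep, pv_foldl_if_filter, PySem.Dict.foldl_insert_getD_add_one_eq_counter]
  -- B's candidate list is the ordered dedup of the filtered character stream
  have hB : (words.foldl (fun acc word =>
      word.toList.foldl (fun acc character =>
        if ¬ (lte.contains (String.mk [character])) ∧ ¬ (acc.contains character)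
        then acc ++ [character] else acc) acc) ([] : List Char))
      = PySem.Set.ofList (cs.filter p) := by
    rw [pv_foldl_inner_flat, ← hcs]
    have hstep : (fun (acc : List Char) (c : Char) =>
        if ¬ (lte.contains (String.mk [c])) ∧ ¬ (acc.contains c)
          then acc ++ [c] else acc) =
        (fun acc c => if p c then PySem.Set.add acc c else acc) := by
      funext acc c
      by_cases hc : String.mk [c] ∈ lte
      · simp [hp, hc]
      · by_cases ha : c ∈ acc <;> simp [hp, hc, ha, PySem.Set.add]
    rw [hstep, pv_foldl_if_filter]
    rfl
  rw [hA, hB]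
  -- the two argmax keys agree on every candidate
  have hkey : ∀ c ∈ PySem.Set.ofList (cs.filter p),
      (PySem.Dict.counter (cs.filter p)).getD c 0 =
      (words.map (fun w => ((PySem.Str.count w (String.mk [c]) : Int)))).sum := by
    intro c hc
    rw [PySem.Dict.getD_counter]
    have hmem : c ∈ cs.filter p := (PySem.Set.mem_ofList _ c).mp hc
    have hpc : p c = true := (List.mem_filter.mp hmem).2
    rw [List.count_filter hpc]
    exact pv_count_flatMap c words
  simp only [PySem.Dict.keys_counter]
  rw [pv_max?_congr_key _ _ _ hkey]
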